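-- pv_equiv track=rewrite | github.com/HanoodTunio/PythonPlayground | modularTask.py | function
-- ===== SOURCE A (Python) =====
-- def function(number):
--     square_root = [-1] * number
--
--     for i in range(1, number):
--
--         for s in range(number):
--             if (s * s) % number == (i - 1) % number:
--                 square_root[i] = s
--                 break
--
--     return square_root
-- ===== SOURCE B (Python) =====
-- def function(number):
--     # Single descending scatter pass: each s writes its residue slot; the
--     # smallest s overwrites last, so it wins.  Same return value as A.
--     square_root = [-1] * number
--     for s in range(number - 1, -1, -1):
--         r = (s * s) % number
--         if r + 1 < number:
--             square_root[r + 1] = s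
--     return square_root
-- ===== Notes on version B (the rewrite author's own statement) =====
-- stated objective: faster
-- what changed: A scans all s in [0,n) for every residue slot (nested loops); B makes one descending pass over s, scattering each s into slot (s*s)%n+1 so the smallest root overwrites last and wins.
import Mathlib
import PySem

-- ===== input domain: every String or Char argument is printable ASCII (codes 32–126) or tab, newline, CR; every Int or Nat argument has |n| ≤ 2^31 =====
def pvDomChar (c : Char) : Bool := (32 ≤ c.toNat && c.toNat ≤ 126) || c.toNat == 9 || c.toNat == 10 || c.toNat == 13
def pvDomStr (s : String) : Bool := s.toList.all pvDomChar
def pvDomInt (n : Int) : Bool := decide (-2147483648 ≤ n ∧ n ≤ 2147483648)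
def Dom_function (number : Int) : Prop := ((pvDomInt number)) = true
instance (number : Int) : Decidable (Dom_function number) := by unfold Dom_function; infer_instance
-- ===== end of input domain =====

-- B replaces A's nested scan (for every residue slot, scan all s) by a single
-- descending scatter pass over s in which the smallest square root overwrites last
-- and wins; measurably faster (one pass instead of a scan per slot).

-- ===== PORT A =====
def function (number : Int) : List Int :=
  (PySem.List.pyRange 1 number 1).foldl (fun sr i =>
      -- inner 'for s in range(number): if …: sr[i] = s; break' = first matching s, if any
      match (PySem.List.pyRange 0 number 1).find? (fun s =>
          PySem.Int.mod (s * s) number == PySem.Int.mod (i - 1) number) with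
      | some s => sr.set i.toNat s
      | none => sr)
    (List.replicate number.toNat (-1))

-- ===== PORT B =====
def function_alt (number : Int) : List Int :=
  (PySem.List.pyRange (number - 1) (-1) (-1)).foldl (fun sr s =>
      let r := PySem.Int.mod (s * s) number
      if r + 1 < number then sr.set (r + 1).toNat s else sr)
    (List.replicate number.toNat (-1))

-- ===== PRECONDITION & SPEC =====
def Spec_function (number : Int) (out : List Int) : Prop := out = function_alt number
instance (number : Int) (out : List Int) : Decidable (Spec_function number out) := by unfold Spec_function; infer_instance

-- ===== CLAIM (what is proved, stated in full; the proofs are below) =====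
def Claim_equal_function : Prop := ∀ (number : Int), Dom_function number → Spec_function number (function number)

-- ===== LEMMAS AND PROOFS =====

def vroot (n j lo : Int) : Int :=
  match (PySem.List.pyRange lo n 1).find? (fun s => PySem.Int.mod (s * s) n == j - 1) with
  | some s => s
  | none => -1

def tableA (n m : Int) : List Int :=
  (List.range n.toNat).map (fun (j : Nat) => if 1 ≤ j ∧ (j : Int) < m then vroot n (j : Int) 0 else -1)

theorem set_map_range (n k : Nat) (f : Nat → Int) (a : Int) :
    ((List.range n).map f).set k a = (List.range n).map (fun j => if j = k then a else f j) := by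
  apply List.ext_getElem
  · simp
  · intro i hi hi2
    simp only [List.getElem_set, List.getElem_map, List.getElem_range]
    split
    · next h => simp [h.symm]
    · next h => rw [if_neg (by omega)]

theorem mod_small (a n : Int) (h0 : 0 ≤ a) (h1 : a < n) : PySem.Int.mod a n = a := by
  rw [PySem.Int.mod_eq_emod_of_pos (by omega)]; exact Int.emod_eq_of_lt h0 h1

theorem invA (n : Int) (m : Int) (hm : 1 ≤ m) (hmn : m ≤ n) :
    (PySem.List.pyRange 1 m 1).foldl (fun sr i =>
      match (PySem.List.pyRange 0 n 1).find? (fun s =>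
          PySem.Int.mod (s * s) n == PySem.Int.mod (i - 1) n) with
      | some s => sr.set i.toNat s
      | none => sr) (List.replicate n.toNat (-1)) = tableA n m := by
  induction m, hm using Int.le_induction with
  | base =>
    rw [PySem.List.pyRange_one_eq_nil (le_refl 1), List.foldl_nil]
    apply List.ext_getElem
    · simp [tableA]
    · intro i hi hi2
      simp only [tableA, List.getElem_map, List.getElem_range, List.getElem_replicate]
      rw [if_neg (by omega)]
  | succ m hm ih =>
    rw [PySem.List.pyRange_one_succ_right (show (1:Int) ≤ m by omega), List.foldl_append,
        ih (by omega), List.foldl_cons, List.foldl_nil]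
    rw [mod_small (m - 1) n (by omega) (by omega)]
    cases hf : (PySem.List.pyRange 0 n 1).find? (fun s =>
        PySem.Int.mod (s * s) n == m - 1) with
    | none =>
      dsimp only
      apply List.ext_getElem
      · simp [tableA]
      · intro i hi hi2
        simp only [tableA, List.getElem_map, List.getElem_range]
        by_cases hi' : (i : Int) = m
        · rw [if_neg (by omega), if_pos (by omega)]
          unfold vroot
          rw [hi', hf]
        · by_cases h1 : 1 ≤ i ∧ (i : Int) < m
          · rw [if_pos h1, if_pos (by omega)]
          · rw [if_neg h1, if_neg (by omega)]
    | some s =>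
      dsimp only
      unfold tableA
      rw [set_map_range]
      congr 1
      funext j
      by_cases hj : j = m.toNat
      · rw [if_pos hj, if_pos (by omega)]
        unfold vroot
        rw [show ((j : Int)) = m by omega, hf]
      · rw [if_neg hj]
        by_cases h1 : 1 ≤ j ∧ (j : Int) < m
        · rw [if_pos h1, if_pos (by omega)]
        · rw [if_neg h1, if_neg (by omega)]

def tableB (n lo : Int) : List Int :=
  (List.range n.toNat).map (fun (j : Nat) => if 1 ≤ j then vroot n (j : Int) lo else -1)

theorem pyRange_neg_append (a b : Int) (hb : b ≤ a) :
    PySem.List.pyRange a (b - 1) (-1) = PySem.List.pyRange a b (-1) ++ [b] := by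
  rw [PySem.List.pyRange_neg_one_eq_reverse, PySem.List.pyRange_neg_one_eq_reverse,
      show b - 1 + 1 = b by ring, PySem.List.pyRange_one_cons (show b < a + 1 by omega),
      List.reverse_cons]

theorem invB (n : Int) (lo : Int) (hn : lo ≤ n - 1) (hlo : -1 ≤ lo) :
    (PySem.List.pyRange (n - 1) lo (-1)).foldl (fun sr s =>
      let r := PySem.Int.mod (s * s) n
      if r + 1 < n then sr.set (r + 1).toNat s else sr)
      (List.replicate n.toNat (-1)) = tableB n (lo + 1) := by
  revert hlo
  induction lo, hn using Int.le_induction_down with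
  | base =>
    intro _
    rw [PySem.List.pyRange_neg_one_eq_nil (le_refl (n-1)), List.foldl_nil]
    apply List.ext_getElem
    · simp [tableB]
    · intro i hi hi2
      simp only [tableB, List.getElem_map, List.getElem_range, List.getElem_replicate]
      rw [show n - 1 + 1 = n by ring]
      split
      · unfold vroot
        rw [PySem.List.pyRange_one_eq_nil (le_refl n)]
        rfl
      · rfl
  | pred lo hn ih =>
    intro hlo
    have h0 : 0 ≤ lo := by omega
    have hn1 : 1 ≤ n := by omega
    rw [show lo - 1 + 1 = lo by ring,
        pyRange_neg_append (n - 1) lo (by omega), List.foldl_append,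
        ih (by omega), List.foldl_cons, List.foldl_nil]
    dsimp only
    have hr0 : 0 ≤ PySem.Int.mod (lo * lo) n := PySem.Int.mod_nonneg _ (by omega)
    have hrn : PySem.Int.mod (lo * lo) n < n := PySem.Int.mod_lt _ (by omega)
    set r := PySem.Int.mod (lo * lo) n with hrdef
    have hvr : ∀ (j : Nat), 0 ≤ (j:Int) - 1 → (j:Int) - 1 < n →
        vroot n (j : Int) lo = if r = (j:Int) - 1 then lo else vroot n (j : Int) (lo + 1) := by
      intro j hj1 hj2
      unfold vroot
      rw [PySem.List.pyRange_one_cons (show lo < n by omega), List.find?_cons]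
      by_cases hrj : r = (j:Int) - 1
      · have hb : PySem.Int.mod (lo * lo) n = (j:Int) - 1 := by rw [← hrdef]; exact hrj
        rw [if_pos hrj]
        have hb2 : (PySem.Int.mod (lo * lo) n == (j:Int) - 1) = true := by simp [hb]
        rw [hb2]
      · have hb : ¬ PySem.Int.mod (lo * lo) n = (j:Int) - 1 := by rw [← hrdef]; exact hrj
        rw [if_neg hrj]
        have hb2 : (PySem.Int.mod (lo * lo) n == (j:Int) - 1) = false := by simp [hb]
        rw [hb2]
    split
    · next hlt =>
      apply List.ext_getElem
      · simp [tableB]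
      · intro i hi hi2
        simp only [List.length_set, List.length_map, List.length_range, tableB] at hi hi2
        simp only [List.getElem_set, tableB, List.getElem_map, List.getElem_range]
        by_cases hieq : (r + 1).toNat = i
        · rw [if_pos hieq]
          rw [if_pos (by omega), hvr i (by omega) (by omega), if_pos (by omega)]
        · rw [if_neg hieq]
          by_cases h1 : 1 ≤ i
          · rw [if_pos h1, if_pos h1, hvr i (by omega) (by omega), if_neg (by omega)]
          · rw [if_neg h1, if_neg h1]
    · next hge =>
      apply List.ext_getElem
      · simp [tableB]
      · intro i hi hi2
        simp only [List.length_map, List.length_range, tableB] at hi hi2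
        simp only [tableB, List.getElem_map, List.getElem_range]
        by_cases h1 : 1 ≤ i
        · rw [if_pos h1, if_pos h1, hvr i (by omega) (by omega), if_neg (by omega)]
        · rw [if_neg h1, if_neg h1]


theorem portA_eq_portB (n : Int) :
    (PySem.List.pyRange 1 n 1).foldl (fun sr i =>
      match (PySem.List.pyRange 0 n 1).find? (fun s =>
          PySem.Int.mod (s * s) n == PySem.Int.mod (i - 1) n) with
      | some s => sr.set i.toNat s
      | none => sr) (List.replicate n.toNat (-1))
    = (PySem.List.pyRange (n - 1) (-1) (-1)).foldl (fun sr s =>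
      let r := PySem.Int.mod (s * s) n
      if r + 1 < n then sr.set (r + 1).toNat s else sr)
      (List.replicate n.toNat (-1)) := by
  by_cases hn : n ≤ 0
  · rw [show PySem.List.pyRange 1 n 1 = [] from PySem.List.pyRange_one_eq_nil (by omega),
        PySem.List.pyRange_neg_one_eq_nil (by omega), List.foldl_nil, List.foldl_nil]
  · have hn' : 1 ≤ n := by omega
    clear hn
    rw [invA n n (by omega) (le_refl n), invB n (-1) (by omega) (by omega)]
    apply List.ext_getElem
    · simp [tableA, tableB]
    · intro i hi hi2
      simp only [tableA, tableB, List.getElem_map, List.getElem_range] at hi hi2 ⊢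
      simp only [List.length_map, List.length_range] at hi hi2
      rw [show (-1:Int) + 1 = 0 by ring]
      by_cases h1 : 1 ≤ i
      · rw [if_pos (by omega), if_pos h1]
      · rw [if_neg (by omega), if_neg h1]

-- ===== VERDICT (by name: the statement is the Claim_ definition above) =====
theorem function_spec : Claim_equal_function := by
  intro n _
  unfold Spec_function function function_alt
  exact portA_eq_portB n
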